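-- pv_equiv track=rewrite | github.com/ice444999-coder/Bazil-The-Great | dedup_sql_files.py | _extract_sql_metadata
-- ===== SOURCE A (Python) =====
-- from typing import Dict, List, Set, Tuple, Optional
--
-- def _extract_sql_metadata(content: str) -> Tuple[Optional[str], List[str]]:
--     """Extract schema name and table names from SQL content"""
--     schema_name = None
--     table_names = []
--
--     lines = content.upper().split('\n')
--
--     for line in lines:
--         line = line.strip()
--
--         # Look for schema creation
--         if line.startswith('CREATE SCHEMA') or line.startswith('USE SCHEMA'):
--             parts = line.split()
--             if len(parts) > 2:
--                 schema_name = parts[2].strip(';"')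
--
--         # Look for table creation
--         elif line.startswith('CREATE TABLE'):
--             parts = line.split()
--             if len(parts) > 2:
--                 table_name = parts[2].strip('();')
--                 # Remove schema prefix if present
--                 if '.' in table_name:
--                     table_name = table_name.split('.')[-1]
--                 table_names.append(table_name)
--
--     return schema_name, table_names
-- ===== SOURCE B (Python) =====
-- def _is_schema_line(line):
--     return ((line.startswith('CREATE SCHEMA') or line.startswith('USE SCHEMA'))
--             and len(line.split()) > 2)
--
--
-- def _is_table_line(line):
--     return line.startswith('CREATE TABLE') and len(line.split()) > 2
--
--
-- def _table_of(line):
--     name = line.split()[2].strip('();')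
--     return name.split('.')[-1] if '.' in name else name
--
--
-- def _extract_sql_metadata(content):
--     lines = [ln.strip() for ln in content.upper().split('\n')]
--     schema_name = next((ln.split()[2].strip(';"')
--                         for ln in reversed(lines) if _is_schema_line(ln)), None)
--     table_names = [_table_of(ln) for ln in lines if _is_table_line(ln)]
--     return schema_name, table_names
-- ===== Notes on version B (the rewrite author's own statement) =====
-- stated objective: idiomatic
-- what changed: Replaces the single stateful loop with two declarative passes over the stripped lines: the schema is the first match scanned from the end (last schema line wins) and the tables are a filtered comprehension, instead of mutating an accumulator per line.
import Mathlib
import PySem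

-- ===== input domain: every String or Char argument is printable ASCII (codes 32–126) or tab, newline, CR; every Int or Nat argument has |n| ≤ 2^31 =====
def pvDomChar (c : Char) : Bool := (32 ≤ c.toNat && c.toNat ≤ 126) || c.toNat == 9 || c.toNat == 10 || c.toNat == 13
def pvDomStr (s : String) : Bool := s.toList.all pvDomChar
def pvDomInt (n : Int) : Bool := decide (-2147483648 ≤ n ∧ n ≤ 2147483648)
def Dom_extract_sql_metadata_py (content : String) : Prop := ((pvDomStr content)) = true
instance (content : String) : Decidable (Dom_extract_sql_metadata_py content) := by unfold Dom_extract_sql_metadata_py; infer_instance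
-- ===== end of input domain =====

-- B replaces A's single stateful line loop by two declarative passes (last schema match from the
-- end, filtered comprehension for tables); objective: idiomatic, same O(n) cost.

-- ===== PORT A =====
-- the body of A's `for line in lines:` loop, transcribed step for step
def aStep (st : Option String × List String) (line0 : String) : Option String × List String :=
  let line := PySem.Str.strip line0
  if PySem.Str.startswith line "CREATE SCHEMA" || PySem.Str.startswith line "USE SCHEMA" then
    let parts := PySem.Str.split₀ line
    if parts.length > 2 then
      (some (PySem.Str.stripChars (parts.getD 2 "") ";\""), st.2)   -- parts[2]: in range, length > 2
    else st
  else if PySem.Str.startswith line "CREATE TABLE" then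
    let parts := PySem.Str.split₀ line
    if parts.length > 2 then
      let tn := PySem.Str.stripChars (parts.getD 2 "") "();"        -- parts[2]: in range, length > 2
      let tn := if PySem.Str.isIn "." tn
                then PySem.List.pyGetD ((PySem.Str.split? tn ".").getD []) (-1) tn  -- split('.')[-1]: split is nonempty
                else tn
      (st.1, st.2 ++ [tn])
    else st
  else st

def extract_sql_metadata_py (content : String) : Option String × List String :=
  let lines := (PySem.Str.split? (PySem.Str.upper content) "\n").getD []
  lines.foldl aStep (none, [])

-- ===== PORT B =====
def isSchemaLine (line : String) : Bool :=
  (PySem.Str.startswith line "CREATE SCHEMA" || PySem.Str.startswith line "USE SCHEMA")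
    && (PySem.Str.split₀ line).length > 2

def isTableLine (line : String) : Bool :=
  PySem.Str.startswith line "CREATE TABLE" && (PySem.Str.split₀ line).length > 2

def tableOf (line : String) : String :=
  let name := PySem.Str.stripChars ((PySem.Str.split₀ line).getD 2 "") "();"
  if PySem.Str.isIn "." name then PySem.List.pyGetD ((PySem.Str.split? name ".").getD []) (-1) name
  else name

def schemaOf (line : String) : String :=
  PySem.Str.stripChars ((PySem.Str.split₀ line).getD 2 "") ";\""

def extract_sql_metadata_py_alt (content : String) : Option String × List String :=
  let lines := ((PySem.Str.split? (PySem.Str.upper content) "\n").getD []).map PySem.Str.strip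
  let schema := (lines.reverse.find? isSchemaLine).map schemaOf
  let tables := (lines.filter isTableLine).map tableOf
  (schema, tables)

-- ===== PRECONDITION & SPEC =====
def Spec_extract_sql_metadata_py (content : String) (out : Option String × List String) : Prop := out = extract_sql_metadata_py_alt content
instance (content : String) (out : Option String × List String) : Decidable (Spec_extract_sql_metadata_py content out) := by unfold Spec_extract_sql_metadata_py; infer_instance

-- ===== CLAIM (what is proved, stated in full; the proofs are below) =====
def Claim_equal_extract_sql_metadata_py : Prop := ∀ (content : String), Dom_extract_sql_metadata_py content → Spec_extract_sql_metadata_py content (extract_sql_metadata_py content)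

-- ===== LEMMAS AND PROOFS =====

-- the two trigger prefixes of the schema branch exclude the table branch's prefix
set_option maxHeartbeats 1000000 in
lemma schema_excludes_table (l : String)
    (h : (PySem.Str.startswith l "CREATE SCHEMA" || PySem.Str.startswith l "USE SCHEMA") = true) :
    PySem.Str.startswith l "CREATE TABLE" = false := by
  by_contra hT
  rw [Bool.not_eq_false] at hT
  have hT' : "CREATE TABLE".toList <+: l.toList := by
    rw [← PySem.Chars.startswith_iff]; simpa using hT
  rcases Bool.or_eq_true_iff.mp h with h1 | h1
  · have h1' : "CREATE SCHEMA".toList <+: l.toList := by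
      rw [← PySem.Chars.startswith_iff]; simpa using h1
    rcases List.prefix_or_prefix_of_prefix h1' hT' with hp | hp <;> revert hp <;> decide
  · have h1' : "USE SCHEMA".toList <+: l.toList := by
      rw [← PySem.Chars.startswith_iff]; simpa using h1
    rcases List.prefix_or_prefix_of_prefix h1' hT' with hp | hp <;> revert hp <;> decide

-- one loop iteration of A, rewritten through B's line classifiers
set_option maxHeartbeats 1000000 in
lemma aStep_eq (st : Option String × List String) (l : String) :
    aStep st l = ((if isSchemaLine (PySem.Str.strip l) then some (schemaOf (PySem.Str.strip l)) else st.1),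
      st.2 ++ (if isTableLine (PySem.Str.strip l) then [tableOf (PySem.Str.strip l)] else [])) := by
  unfold aStep isSchemaLine isTableLine schemaOf tableOf
  by_cases h1 : (PySem.Str.startswith (PySem.Str.strip l) "CREATE SCHEMA" || PySem.Str.startswith (PySem.Str.strip l) "USE SCHEMA") = true
  · have h2 := schema_excludes_table _ h1
    by_cases h3 : (PySem.Str.split₀ (PySem.Str.strip l)).length > 2
    · simp only [h1, h2, if_true]
      simp only [h3, decide_true, if_true, Bool.true_and, Bool.false_and, Bool.false_eq_true,
        if_false, List.append_nil]
    · simp only [h1, h2, if_true]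
      simp only [h3, decide_false, if_false, Bool.true_and, Bool.false_and, Bool.false_eq_true,
        List.append_nil]
  · rw [Bool.not_eq_true, Bool.or_eq_false_iff] at h1
    obtain ⟨ha, hb⟩ := h1
    simp only [ha, hb, Bool.false_or, if_false, Bool.false_eq_true]
    by_cases h2 : PySem.Str.startswith (PySem.Str.strip l) "CREATE TABLE" = true
    · simp only [h2, if_true, Bool.true_and]
      by_cases h3 : (PySem.Str.split₀ (PySem.Str.strip l)).length > 2
      · simp only [h3, decide_true, if_true, Bool.false_and, Bool.false_eq_true, if_false]
      · simp only [h3, decide_false, if_false, List.append_nil, Bool.false_eq_true, Bool.false_and]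
    · rw [Bool.not_eq_true] at h2
      simp only [h2, if_false, Bool.false_and, Bool.false_eq_true, List.append_nil]

-- A's fold over the raw lines, characterised by B's two passes over the stripped lines
lemma foldl_aStep_eq (ls : List String) (s : Option String) (ts : List String) :
    ls.foldl aStep (s, ts) =
      ((match ((ls.map PySem.Str.strip).reverse.find? isSchemaLine) with
        | some m => some (schemaOf m)
        | none => s),
       ts ++ ((ls.map PySem.Str.strip).filter isTableLine).map tableOf) := by
  induction ls generalizing s ts with
  | nil => simp
  | cons l tl ih =>
    simp only [List.foldl_cons, List.map_cons, List.reverse_cons, List.filter_cons]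
    rw [aStep_eq, ih, List.find?_append]
    cases hf : ((tl.map PySem.Str.strip).reverse.find? isSchemaLine) with
    | some m => cases h2 : isTableLine (PySem.Str.strip l) <;> simp
    | none =>
      cases h1 : isSchemaLine (PySem.Str.strip l) <;>
        cases h2 : isTableLine (PySem.Str.strip l) <;>
          simp [h1, List.find?]

-- ===== VERDICT (by name: the statement is the Claim_ definition above) =====
theorem extract_sql_metadata_py_spec : Claim_equal_extract_sql_metadata_py := by
  intro content _
  unfold Spec_extract_sql_metadata_py extract_sql_metadata_py extract_sql_metadata_py_alt
  rw [foldl_aStep_eq]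
  cases h : (((PySem.Str.split? (PySem.Str.upper content) "\n").getD []).map PySem.Str.strip).reverse.find? isSchemaLine <;>
    simp only [h, Option.map_some, Option.map_none, List.nil_append]
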